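-- pv_equiv track=rewrite | github.com/synaptent/RingRift | ai-service/app/rules/mutable_state.py | _calculate_cap_height
-- ===== SOURCE A (Python) =====
-- def _calculate_cap_height(rings: list[int]) -> int:
--     """Calculate the cap height of a stack from its rings list."""
--     if not rings:
--         return 0
--     controlling_player = rings[-1]
--     height = 0
--     for r in reversed(rings):
--         if r == controlling_player:
--             height += 1
--         else:
--             break
--     return height
-- ===== SOURCE B (Python) =====
-- def _calculate_cap_height(rings: list[int]) -> int:
--     """Partition the stack front-to-back into maximal runs of equal rings;
--     the cap height is the length of the last run (0 for an empty stack)."""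
--     run_lengths = []
--     i = 0
--     n = len(rings)
--     while i < n:
--         j = i
--         while j < n and rings[j] == rings[i]:
--             j += 1
--         run_lengths.append(j - i)
--         i = j
--     return run_lengths[-1] if run_lengths else 0
-- ===== Notes on version B (the rewrite author's own statement) =====
-- stated objective: alternative
-- what changed: B partitions the whole list front-to-back into maximal runs of equal values and returns the length of the last run, instead of A's backward scan over reversed(rings) with an early break.
import Mathlib
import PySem

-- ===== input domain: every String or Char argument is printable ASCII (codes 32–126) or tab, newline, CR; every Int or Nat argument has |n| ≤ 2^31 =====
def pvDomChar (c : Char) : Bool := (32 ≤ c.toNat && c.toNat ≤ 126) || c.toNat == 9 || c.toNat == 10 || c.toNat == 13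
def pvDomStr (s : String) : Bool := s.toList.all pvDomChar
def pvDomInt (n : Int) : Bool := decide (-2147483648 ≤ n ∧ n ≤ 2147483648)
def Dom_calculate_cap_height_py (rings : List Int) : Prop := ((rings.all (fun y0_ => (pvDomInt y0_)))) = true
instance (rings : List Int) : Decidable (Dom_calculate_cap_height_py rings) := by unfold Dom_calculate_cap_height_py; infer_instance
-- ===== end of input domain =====

-- B partitions the list into maximal runs and takes the last run's length; A scans the reversed list with a break.

-- ===== PORT A =====
-- the 'for r in reversed(rings): … else: break' loop: counts the prefix of the reversed list equal to c, stops at the first mismatch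
def pvAloop (c : Int) : List Int → Int
  | [] => 0
  | r :: rest => if r = c then 1 + pvAloop c rest else 0

def calculate_cap_height_py (rings : List Int) : Int :=
  if rings = [] then 0
  else
    let controlling_player := (PySem.List.pyGet? rings (-1)).getD 0
    pvAloop controlling_player rings.reverse

-- ===== PORT B =====
-- the outer while loop of Source B: each step spans one maximal run (inner while = takeWhile/dropWhile) and records its length
def pvRunLengths : List Int → List Int
  | [] => []
  | x :: xs =>
    (1 + (xs.takeWhile (· = x)).length : Int) :: pvRunLengths (xs.dropWhile (· = x))
termination_by l => l.length
decreasing_by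
  simp only [List.length_cons]
  exact Nat.lt_succ_of_le (List.length_dropWhile_le _ _)

def calculate_cap_height_py_alt (rings : List Int) : Int :=
  (pvRunLengths rings).getLast?.getD 0

-- ===== PRECONDITION & SPEC =====
def Spec_calculate_cap_height_py (rings : List Int) (out : Int) : Prop := out = calculate_cap_height_py_alt rings
instance (rings : List Int) (out : Int) : Decidable (Spec_calculate_cap_height_py rings out) := by unfold Spec_calculate_cap_height_py; infer_instance

-- ===== CLAIM (what is proved, stated in full; the proofs are below) =====
def Claim_equal_calculate_cap_height_py : Prop := ∀ (rings : List Int), Dom_calculate_cap_height_py rings → Spec_calculate_cap_height_py rings (calculate_cap_height_py rings)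

-- ===== LEMMAS AND PROOFS =====

-- A's loop counts the takeWhile-prefix
theorem pvAloop_eq_takeWhile (c : Int) (l : List Int) :
    pvAloop c l = ((l.takeWhile (· = c)).length : Int) := by
  induction l with
  | nil => simp [pvAloop]
  | cons r rest ih =>
    by_cases h : r = c <;> simp [pvAloop, h, ih]
    omega

theorem pvRunLengths_ne_nil (x : Int) (xs : List Int) : pvRunLengths (x :: xs) ≠ [] := by
  rw [pvRunLengths]; simp

theorem pvTakeWhile_nil_of_ne (c : Int) (L : List Int) (h : ∀ a ∈ L, a ≠ c) :
    L.takeWhile (· = c) = [] := by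
  cases L with
  | nil => rfl
  | cons a t => simp [h a (by simp)]

-- B's last run length is the length of the trailing run of elements equal to the last element
theorem pvRunLengths_last (l : List Int) :
    (pvRunLengths l).getLast?.getD 0
      = ((l.reverse.takeWhile (· = l.getLast?.getD 0)).length : Int) := by
  induction l using pvRunLengths.induct with
  | case1 => simp [pvRunLengths]
  | case2 x xs ih =>
    rcases hrest : xs.dropWhile (· = x) with - | ⟨y, t⟩
    · -- the whole list is one run of x's
      have hall : ∀ a ∈ xs, a = x := by
        intro a ha
        simpa using List.dropWhile_eq_nil_iff.mp hrest a ha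
      have htw : xs.takeWhile (· = x) = xs :=
        List.takeWhile_eq_self_iff.mpr (by intro a ha; simpa using hall a ha)
      have hlast : (x :: xs).getLast?.getD 0 = x := by
        have hmem := List.getLast_mem (l := x :: xs) (by simp)
        have hx : (x :: xs).getLast (by simp) = x := by
          rcases List.mem_cons.mp hmem with h | h
          · exact h
          · exact hall _ h
        rw [List.getLast?_eq_some_getLast (by simp), Option.getD_some, hx]
      have hrev : (x :: xs).reverse.takeWhile (· = x) = (x :: xs).reverse := by
        apply List.takeWhile_eq_self_iff.mpr
        intro a ha
        rcases (by simpa using ha : a ∈ xs ∨ a = x) with h | h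
        · simp [hall a h]
        · simp [h]
      rw [pvRunLengths, hrest, htw, hlast, hrev]
      simp [pvRunLengths]
      omega
    · -- there is a later run; the trailing run lies entirely inside the tail after the first run
      have hsplit : xs = xs.takeWhile (· = x) ++ (y :: t) := by
        conv_lhs => rw [← List.takeWhile_append_dropWhile (p := (· = x)) (l := xs)]
        rw [hrest]
      have hyx : y ≠ x := by
        have hne : xs.dropWhile (· = x) ≠ [] := by rw [hrest]; simp
        have h2 := List.head_dropWhile_not (· = x) hne
        have h3 : (xs.dropWhile (· = x)).head? = some y := by rw [hrest]; rfl
        rw [List.head?_eq_some_head hne, Option.some.injEq] at h3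
        rw [h3] at h2; simpa using h2
      have hpx : ∀ a ∈ xs.takeWhile (· = x), a = x := by
        intro a ha; simpa using List.mem_takeWhile_imp ha
      -- the last element of the whole list is that of the tail run part
      have hlast : (x :: xs).getLast?.getD 0 = (y :: t).getLast?.getD 0 := by
        have : (x :: xs) = (x :: xs.takeWhile (· = x)) ++ (y :: t) := by
          rw [List.cons_append, ← hsplit]
        rw [this, List.getLast?_append]
        cases h : (y :: t).getLast? with
        | none => simp at h
        | some z => simp
      rw [pvRunLengths, hrest]
      rw [hrest] at ih
      set c : Int := (y :: t).getLast?.getD 0 with hc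
      -- drop the head of the run-length list (the tail is nonempty)
      have hL : ((1 + ((xs.takeWhile (· = x)).length : Int)) :: pvRunLengths (y :: t)).getLast?.getD 0
          = (pvRunLengths (y :: t)).getLast?.getD 0 := by
        rcases h : pvRunLengths (y :: t) with - | ⟨z, zs⟩
        · exact absurd h (pvRunLengths_ne_nil y t)
        · rw [List.getLast?_cons_cons]
      rw [hL, ih, hlast]
      have hrev : (x :: xs).reverse = (y :: t).reverse ++ (x :: xs.takeWhile (· = x)).reverse := by
        rw [← List.reverse_append, List.cons_append, ← hsplit]
      rw [hrev, List.takeWhile_append]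
      split_ifs with hcond
      · -- the whole tail run equals c; the run cannot cross into the x-run since y ≠ x
        have heq : (y :: t).reverse.takeWhile (· = c) = (y :: t).reverse :=
          (List.takeWhile_prefix _).eq_of_length hcond
        have hyc : y = c := by
          have hy : y ∈ (y :: t).reverse.takeWhile (· = c) := by rw [heq]; simp
          simpa using List.mem_takeWhile_imp hy
        have hnil : ((x :: xs.takeWhile (· = x)).reverse).takeWhile (· = c) = [] := by
          apply pvTakeWhile_nil_of_ne
          intro a ha
          have hax : a = x := by
            rcases (by simpa using ha : a ∈ xs.takeWhile (· = x) ∨ a = x) with h | h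
            · exact hpx a h
            · exact h
          rw [hax]; exact fun h => hyx (hyc.trans h.symm)
        rw [hnil, heq, List.append_nil]
      · rfl

-- ===== VERDICT (by name: the statement is the Claim_ definition above) =====
theorem calculate_cap_height_py_spec : Claim_equal_calculate_cap_height_py := by
  intro rings _
  unfold Spec_calculate_cap_height_py calculate_cap_height_py calculate_cap_height_py_alt
  split_ifs with h
  · rw [h]; simp [pvRunLengths]
  · rw [PySem.List.pyGet?_neg_one, pvAloop_eq_takeWhile, pvRunLengths_last]
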